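-- pv_equiv track=rewrite | github.com/zji25/ct | dm/comb/d03.py | ternary
-- ===== SOURCE A (Python) =====
-- def ternary(x, n):
--     res = ''
--     while x:
--         x, m = divmod(x, 3)
--         res += str(m)
--     while len(res) < n:
--         res += '0'
--     return res[::-1]
-- ===== SOURCE B (Python) =====
-- def ternary(x, n):
--     def go(t):
--         return go(t // 3) + str(t % 3) if t else ''
--     s = go(x)
--     return '0' * (n - len(s)) + s
-- ===== Notes on version B (the rewrite author's own statement) =====
-- stated objective: faster
-- what changed: Replaces A's LSB-first accumulate + pad-then-reverse loops with a most-significant-first recursion plus a single '0'*(n-len) pad prefix, so no reversal and no character-at-a-time padding loop.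
import Mathlib
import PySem

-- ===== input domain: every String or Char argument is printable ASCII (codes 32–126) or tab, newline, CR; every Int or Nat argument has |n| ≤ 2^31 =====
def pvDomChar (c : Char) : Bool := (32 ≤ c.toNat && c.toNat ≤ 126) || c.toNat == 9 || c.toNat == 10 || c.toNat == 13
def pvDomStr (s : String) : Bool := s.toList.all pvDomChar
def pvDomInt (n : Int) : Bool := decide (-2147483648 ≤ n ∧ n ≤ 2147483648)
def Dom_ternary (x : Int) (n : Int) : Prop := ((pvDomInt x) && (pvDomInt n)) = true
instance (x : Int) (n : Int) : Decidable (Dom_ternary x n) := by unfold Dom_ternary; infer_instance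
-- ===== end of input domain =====

-- B changes the decomposition: most-significant-first recursion plus a single '0'-prefix pad,
-- instead of A's LSB-first digit loop, padding loop and final reversal. Return value only.

-- ===== PORT A =====
-- 'while x: x, m = divmod(x, 3); res += str(m)'.  For x < 0 the Python loop diverges
-- (divmod keeps x at -1) and returns no value; the port exits there, matching B's port.
def ternALoop (x : Int) (res : List Char) : List Char :=
  if h : 0 < x then
    ternALoop (PySem.Int.floordiv x 3) (res ++ PySem.Int.toChars (PySem.Int.mod x 3))
  else res
termination_by x.toNat
decreasing_by
  have h3 : PySem.Int.floordiv x 3 = x / 3 := PySem.Int.floordiv_eq_ediv_of_pos (by omega)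
  omega

-- 'while len(res) < n: res += '0''
def ternAPad (res : List Char) (n : Int) : List Char :=
  if h : (res.length : Int) < n then ternAPad (res ++ ['0']) n else res
termination_by (n - res.length).toNat
decreasing_by simp; omega

-- 'return res[::-1]' — res[::-1] is the reversal (PySem.List.slice?_none_none_neg_one)
def ternary (x : Int) (n : Int) : String :=
  String.ofList ((ternAPad (ternALoop x []) n).reverse)

-- ===== PORT B =====
-- 'go(t // 3) + str(t % 3) if t else '''; t < 0 recurses forever in Python.
def ternBGo (t : Int) : List Char :=
  if h : 0 < t then
    ternBGo (PySem.Int.floordiv t 3) ++ PySem.Int.toChars (PySem.Int.mod t 3)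
  else []
termination_by t.toNat
decreasing_by
  have h3 : PySem.Int.floordiv t 3 = t / 3 := PySem.Int.floordiv_eq_ediv_of_pos (by omega)
  omega

-- ''0' * (n - len(s)) + s'
def ternary_alt (x : Int) (n : Int) : String :=
  let s := ternBGo x
  String.ofList (List.replicate (n - (s.length : Int)).toNat '0' ++ s)

-- ===== PRECONDITION & SPEC =====
def Spec_ternary (x : Int) (n : Int) (out : String) : Prop := out = ternary_alt x n
instance (x : Int) (n : Int) (out : String) : Decidable (Spec_ternary x n out) := by unfold Spec_ternary; infer_instance

-- ===== CLAIM (what is proved, stated in full; the proofs are below) =====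
def Claim_equal_ternary : Prop := ∀ (x : Int) (n : Int), Dom_ternary x n → Spec_ternary x n (ternary x n)

-- ===== LEMMAS AND PROOFS =====

-- str(x % 3) is a single digit character
lemma toChars_mod3_single (x : Int) :
    ∃ c : Char, PySem.Int.toChars (PySem.Int.mod x 3) = [c] := by
  have h0 : 0 ≤ PySem.Int.mod x 3 := PySem.Int.mod_nonneg x (by omega)
  have h1 : PySem.Int.mod x 3 < 3 := PySem.Int.mod_lt x (by omega)
  interval_cases (PySem.Int.mod x 3) <;> exact ⟨_, rfl⟩

-- A's digit loop appends, in reverse order, exactly B's MSB-first digit string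
lemma ternALoop_eq (x : Int) (res : List Char) :
    ternALoop x res = res ++ (ternBGo x).reverse := by
  by_cases h : 0 < x
  · have hlt : (PySem.Int.floordiv x 3).toNat < x.toNat := by
      have h3 : PySem.Int.floordiv x 3 = x / 3 := PySem.Int.floordiv_eq_ediv_of_pos (by omega)
      omega
    rw [ternALoop, ternBGo, dif_pos h, dif_pos h,
        ternALoop_eq (PySem.Int.floordiv x 3)]
    obtain ⟨c, hc⟩ := toChars_mod3_single x
    simp only [List.reverse_append, hc, List.reverse_cons, List.reverse_nil, List.nil_append,
      List.append_assoc]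
  · rw [ternALoop, ternBGo, dif_neg h, dif_neg h]
    simp
termination_by x.toNat

-- A's padding loop is appending (n - len).toNat zeros
lemma ternAPad_eq (res : List Char) (n : Int) :
    ternAPad res n = res ++ List.replicate (n - (res.length : Int)).toNat '0' := by
  by_cases h : (res.length : Int) < n
  · rw [ternAPad, dif_pos h, ternAPad_eq (res ++ ['0'])]
    have : (n - (res.length : Int)).toNat = (n - ((res ++ ['0']).length : Int)).toNat + 1 := by
      simp; omega
    rw [this, List.replicate_succ]
    simp
  · rw [ternAPad, dif_neg h]
    have : (n - (res.length : Int)).toNat = 0 := by omega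
    simp [this]
termination_by (n - res.length).toNat
decreasing_by simp; omega

-- ===== VERDICT (by name: the statement is the Claim_ definition above) =====
theorem ternary_spec : Claim_equal_ternary := by
  intro x n _
  unfold Spec_ternary ternary ternary_alt
  rw [ternALoop_eq, ternAPad_eq]
  simp [List.reverse_append]
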